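-- pv_equiv track=rewrite | github.com/biren-parmar/BlocksWorld | common_functions.py | h_func
-- ===== SOURCE A (Python) =====
-- def index_of_last_nonzero(lst):
--     for i, value in enumerate(reversed(lst)):
--         if value != 0:
--             return len(lst) - i - 1
--     return -1
--
-- def h_func(state):
--     C1 = []
--     C2 = []
--     for i in range(0, len(state)):
--         for j in range(1, len(state[0]) + 1):
--             if j in state[i]:
--                 k = state[i].index(j)
--                 last_ind = index_of_last_nonzero(state[i])
--                 cost1 = (last_ind - k) + 1
--                 if (((index_of_last_nonzero(state[0])) - (j - 1) + 1) >= 0):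
--                     cost2 = ((index_of_last_nonzero(state[0])) - (j - 1) + 1)
--                 else:
--                     cost2 = 0
--                 C1.append(cost1)
--                 C2.append(cost2)
--                 # print "C=" + str(cost1) + "," + str(cost2)
--                 # print str(j) + "location= " + str(i) + "," + str(k)
--
--     # print C1
--     # print C2
--     COST = sum(C1) + sum(C2)
--     # print COST
--     return COST
-- ===== SOURCE B (Python) =====
-- def last_nonzero(row):
--     last = -1
--     for p, v in enumerate(row):
--         if v != 0:
--             last = p
--     return last
--
-- def h_func(state):
--     total = 0
--     if state:
--         M = len(state[0])
--         last0 = last_nonzero(state[0])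
--         for row in state:
--             last = last_nonzero(row)
--             seen = set()
--             for p, v in enumerate(row):
--                 if 1 <= v <= M and v not in seen:
--                     seen.add(v)
--                     total += (last - p + 1) + max(0, last0 - v + 2)
--     return total
-- ===== Notes on version B (the rewrite author's own statement) =====
-- stated objective: faster
-- what changed: A loops over every candidate value j=1..M per row and rescans the row for membership, index and last-nonzero for each j; B instead makes one forward pass over each row's elements, taking each first occurrence of an in-range value via a seen-set and accumulating its cost directly (the summation order differs, which is harmless for a sum).
import Mathlib
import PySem

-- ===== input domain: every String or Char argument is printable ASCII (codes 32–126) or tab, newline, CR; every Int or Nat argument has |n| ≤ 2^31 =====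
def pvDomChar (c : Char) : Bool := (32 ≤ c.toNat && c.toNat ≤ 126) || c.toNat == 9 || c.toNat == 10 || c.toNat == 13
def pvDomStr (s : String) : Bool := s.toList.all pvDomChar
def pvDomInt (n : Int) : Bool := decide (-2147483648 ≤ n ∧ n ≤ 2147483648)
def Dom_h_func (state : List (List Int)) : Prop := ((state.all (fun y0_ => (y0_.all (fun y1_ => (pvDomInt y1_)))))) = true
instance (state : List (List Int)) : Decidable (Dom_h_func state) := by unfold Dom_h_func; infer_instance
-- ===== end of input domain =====

-- B drops A's loop over candidate values 1..M (with its membership/index/last-nonzero rescans)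
-- and instead makes one forward pass over each row's elements, taking each first occurrence of an
-- in-range value as it appears (a seen-set) and adding its cost to a running total; the summation
-- order differs from A's but the sum is the same. Asymptotically fewer scans.

-- ===== PORT A =====
-- 'for i, value in enumerate(reversed(lst)): if value != 0: return len(lst) - i - 1'
def iolnzGo (n : Int) : List (Int × Int) → Int
  | [] => -1
  | (i, v) :: rest => if v ≠ 0 then n - i - 1 else iolnzGo n rest

def index_of_last_nonzero (lst : List Int) : Int :=
  iolnzGo (lst.length : Int) (PySem.List.enumerate lst.reverse 0)

def h_func (state : List (List Int)) : Int :=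
  let C := (PySem.List.pyRange 0 (state.length : Int) 1).foldl
    (fun (C : List Int × List Int) i =>
      (PySem.List.pyRange 1 (((PySem.List.pyGetD state 0 []).length : Int) + 1) 1).foldl
        (fun (C : List Int × List Int) j =>
          if j ∈ PySem.List.pyGetD state i [] then
            let k : Int := ((PySem.List.index? (PySem.List.pyGetD state i []) j).getD 0 : Nat)
            let last_ind := index_of_last_nonzero (PySem.List.pyGetD state i [])
            let cost1 := (last_ind - k) + 1
            let cost2 := if index_of_last_nonzero (PySem.List.pyGetD state 0 []) - (j - 1) + 1 ≥ 0
              then index_of_last_nonzero (PySem.List.pyGetD state 0 []) - (j - 1) + 1 else 0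
            (C.1 ++ [cost1], C.2 ++ [cost2])
          else C) C)
    ([], [])
  C.1.sum + C.2.sum

-- ===== PORT B =====
-- 'last = -1; for p, v in enumerate(row): if v != 0: last = p; return last'
def last_nonzero (row : List Int) : Int :=
  (PySem.List.enumerate row 0).foldl (fun last pv => if pv.2 ≠ 0 then pv.1 else last) (-1)

def h_func_alt (state : List (List Int)) : Int :=
  if state = [] then 0
  else
    let M : Int := ((PySem.List.pyGetD state 0 []).length : Int)
    let last0 := last_nonzero (PySem.List.pyGetD state 0 [])
    state.foldl (fun total row =>
      let last := last_nonzero row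
      ((PySem.List.enumerate row 0).foldl
        (fun (st : PySem.Set Int × Int) pv =>
          if 1 ≤ pv.2 ∧ pv.2 ≤ M ∧ pv.2 ∉ st.1 then
            (PySem.Set.add st.1 pv.2,
             st.2 + ((last - pv.1 + 1) + max 0 (last0 - pv.2 + 2)))
          else st) (PySem.Set.empty, total)).2) 0

-- ===== PRECONDITION & SPEC =====
def Spec_h_func (state : List (List Int)) (out : Int) : Prop := out = h_func_alt state
instance (state : List (List Int)) (out : Int) : Decidable (Spec_h_func state out) := by unfold Spec_h_func; infer_instance

-- ===== CLAIM (what is proved, stated in full; the proofs are below) =====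
def Claim_equal_h_func : Prop := ∀ (state : List (List Int)), Dom_h_func state → Spec_h_func state (h_func state)

-- ===== LEMMAS AND PROOFS =====
-- proof-only helpers: positions of the first/last nonzero entry of a row

def firstNZ : List Int → Option Nat
  | [] => none
  | v :: rest => if v ≠ 0 then some 0 else (firstNZ rest).map (· + 1)

def lastNZ : List Int → Option Nat
  | [] => none
  | v :: rest => match lastNZ rest with
    | some q => some (q + 1)
    | none => if v ≠ 0 then some 0 else none

theorem lastNZ_lt {xs : List Int} {q : Nat} (h : lastNZ xs = some q) : q < xs.length := by
  induction xs generalizing q with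
  | nil => simp [lastNZ] at h
  | cons v rest ih =>
    simp only [lastNZ] at h
    cases hr : lastNZ rest with
    | some p => rw [hr] at h; cases h; have := ih hr; simp; omega
    | none => rw [hr] at h; split_ifs at h <;> simp_all <;> omega

theorem iolnzGo_enum (xs : List Int) (n : Int) : ∀ s : Int,
    iolnzGo n (PySem.List.enumerate xs s)
      = match firstNZ xs with
        | some p => n - (s + (p : Int)) - 1
        | none => -1 := by
  induction xs with
  | nil => intro s; simp [PySem.List.enumerate_nil, iolnzGo, firstNZ]
  | cons v rest ih =>
    intro s
    rw [PySem.List.enumerate_cons]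
    simp only [iolnzGo, firstNZ]
    split_ifs with hv
    · simp
    · rw [ih (s + 1)]
      cases hr : firstNZ rest with
      | some p => simp [hr]; omega
      | none => simp [hr]

theorem firstNZ_append (xs ys : List Int) :
    firstNZ (xs ++ ys)
      = match firstNZ xs with
        | some p => some p
        | none => (firstNZ ys).map (· + xs.length) := by
  induction xs with
  | nil => simp [firstNZ]
  | cons v rest ih =>
    simp only [List.cons_append, firstNZ, ih]
    split_ifs with hv
    · simp
    · cases hr : firstNZ rest with
      | some p => simp [hr]
      | none => cases hy : firstNZ ys <;> simp [hr, hy, List.length_cons] <;> omega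

theorem rev_rel (xs : List Int) :
    firstNZ xs.reverse = (lastNZ xs).map (fun q => xs.length - 1 - q) := by
  induction xs with
  | nil => simp [firstNZ, lastNZ]
  | cons v rest ih =>
    rw [List.reverse_cons, firstNZ_append, ih]
    simp only [lastNZ]
    cases hr : lastNZ rest with
    | some q => simp [List.length_cons]; omega
    | none =>
      split_ifs with hv
      · simp [firstNZ, hv]
      · simp [firstNZ, hv]

theorem lnz_eq_lastNZ (xs : List Int) :
    index_of_last_nonzero xs
      = match lastNZ xs with
        | some q => (q : Int)
        | none => -1 := by
  rw [index_of_last_nonzero, iolnzGo_enum, rev_rel]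
  cases hr : lastNZ xs with
  | some q =>
    have hq := lastNZ_lt hr
    rw [Option.map_some]
    show (xs.length : Int) - (0 + ((xs.length - 1 - q : Nat) : Int)) - 1 = (q : Int)
    omega
  | none => rw [Option.map_none]

theorem last_nonzero_go (xs : List Int) : ∀ (s a : Int),
    (PySem.List.enumerate xs s).foldl (fun last pv => if pv.2 ≠ 0 then pv.1 else last) a
      = match lastNZ xs with | some q => s + (q : Int) | none => a := by
  induction xs with
  | nil => intro s a; rfl
  | cons v rest ih =>
    intro s a
    rw [PySem.List.enumerate_cons, List.foldl_cons]
    show (PySem.List.enumerate rest (s+1)).foldl _ (if v ≠ 0 then s else a) = _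
    rw [ih]
    cases hr : lastNZ rest with
    | some q =>
      simp only [lastNZ, hr]
      show s + 1 + (q : Int) = s + ((q + 1 : Nat) : Int)
      push_cast; ring
    | none =>
      simp only [lastNZ, hr]
      split_ifs with hv
      · show (s : Int) = s + ((0 : Nat) : Int); simp
      · rfl

theorem last_nonzero_eq (xs : List Int) : last_nonzero xs = index_of_last_nonzero xs := by
  rw [last_nonzero, last_nonzero_go, lnz_eq_lastNZ]
  cases lastNZ xs with
  | some q => show 0 + (q : Int) = (q : Int); ring
  | none => rfl

-- the pairs (position, value) B's seen-set pass actually takes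
def takeB (M : Int) : List Int → Int → List Int → List (Int × Int)
  | [], _, _ => []
  | v :: rest, p, seen =>
    if 1 ≤ v ∧ v ≤ M ∧ v ∉ seen then
      (p, v) :: takeB M rest (p + 1) (PySem.Set.add seen v)
    else takeB M rest (p + 1) seen

theorem takeB_mem (M : Int) : ∀ (r : List Int) (s : Int) (seen : List Int) (p v : Int),
    (p, v) ∈ takeB M r s seen →
      (1 ≤ v ∧ v ≤ M ∧ v ∉ seen) ∧ ∃ k : Nat, PySem.List.index? r v = some k ∧ p = s + (k : Int) := by
  intro r
  induction r with
  | nil => intro s seen p v h; simp [takeB] at h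
  | cons v0 rest ih =>
    intro s seen p v h
    rw [takeB] at h
    split_ifs at h with h0
    · rcases List.mem_cons.mp h with heq | hrec
      · obtain ⟨hp, hv⟩ := Prod.mk.inj heq
        subst hp; subst hv
        exact ⟨h0, 0, by rw [PySem.List.index?_cons_self], by simp⟩
      · obtain ⟨⟨h1, h2, h3⟩, k, hk, hp⟩ := ih (s + 1) _ p v hrec
        have hne : v ≠ v0 := by
          intro he; exact h3 ((PySem.Set.mem_add _ _ _).mpr (Or.inr he))
        have hns : v ∉ seen := fun hs => h3 ((PySem.Set.mem_add _ _ _).mpr (Or.inl hs))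
        refine ⟨⟨h1, h2, hns⟩, k + 1, ?_, ?_⟩
        · rw [PySem.List.index?_cons_of_ne rest (fun he => hne he.symm), hk]; rfl
        · push_cast; omega
    · obtain ⟨⟨h1, h2, h3⟩, k, hk, hp⟩ := ih (s + 1) seen p v h
      have hne : v ≠ v0 := by
        intro he; subst he; exact h0 ⟨h1, h2, h3⟩
      refine ⟨⟨h1, h2, h3⟩, k + 1, ?_, ?_⟩
      · rw [PySem.List.index?_cons_of_ne rest (fun he => hne he.symm), hk]; rfl
      · push_cast; omega

theorem mem_snd_takeB (M : Int) : ∀ (r : List Int) (s : Int) (seen : List Int) (v : Int),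
    v ∈ (takeB M r s seen).map (·.2) ↔ v ∈ r ∧ (1 ≤ v ∧ v ≤ M) ∧ v ∉ seen := by
  intro r
  induction r with
  | nil => intro s seen v; simp [takeB]
  | cons v0 rest ih =>
    intro s seen v
    rw [takeB]
    split_ifs with h0
    · by_cases hv : v = v0
      · subst hv; simp [h0.1, h0.2.1, h0.2.2]
      · simp only [List.map_cons, List.mem_cons, ih, PySem.Set.mem_add _ _ _]
        constructor
        · rintro (h | ⟨h1, h2, h3⟩)
          · exact absurd h hv
          · exact ⟨Or.inr h1, h2, fun hs => h3 (Or.inl hs)⟩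
        · rintro ⟨h1, h2, h3⟩
          rcases h1 with he | hm
          · exact absurd he hv
          · exact Or.inr ⟨hm, h2, fun hs => hs.elim h3 hv⟩
    · rw [ih]
      constructor
      · rintro ⟨h1, h2, h3⟩
        exact ⟨List.mem_cons.mpr (Or.inr h1), h2, h3⟩
      · rintro ⟨h1, h2, h3⟩
        rcases List.mem_cons.mp h1 with he | hm
        · subst he; exact absurd ⟨h2.1, h2.2, h3⟩ h0
        · exact ⟨hm, h2, h3⟩

theorem nodup_snd_takeB (M : Int) : ∀ (r : List Int) (s : Int) (seen : List Int),
    ((takeB M r s seen).map (·.2)).Nodup := by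
  intro r
  induction r with
  | nil => intro s seen; simp [takeB]
  | cons v0 rest ih =>
    intro s seen
    rw [takeB]
    split_ifs with h0
    · rw [List.map_cons, List.nodup_cons]
      refine ⟨fun hm => ?_, ih _ _⟩
      have := ((mem_snd_takeB M rest (s + 1) _ v0).mp hm).2.2
      exact this ((PySem.Set.mem_add _ _ _).mpr (Or.inr rfl))
    · exact ih _ _

-- B's inner seen-set fold is a running total over the taken pairs
theorem innerB (M last last0 : Int) (r : List Int) : ∀ (s : Int) (seen : PySem.Set Int) (t : Int),
    ((PySem.List.enumerate r s).foldl
      (fun (st : PySem.Set Int × Int) pv =>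
        if 1 ≤ pv.2 ∧ pv.2 ≤ M ∧ pv.2 ∉ st.1 then
          (PySem.Set.add st.1 pv.2,
           st.2 + ((last - pv.1 + 1) + max 0 (last0 - pv.2 + 2)))
        else st) (seen, t)).2
    = t + ((takeB M r s seen).map
        (fun pv => (last - pv.1 + 1) + max 0 (last0 - pv.2 + 2))).sum := by
  induction r with
  | nil => intro s seen t; simp [takeB, PySem.List.enumerate_nil]
  | cons v rest ih =>
    intro s seen t
    rw [PySem.List.enumerate_cons, List.foldl_cons, takeB]
    by_cases h0 : 1 ≤ v ∧ v ≤ M ∧ v ∉ seen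
    · rw [if_pos h0, if_pos h0]
      show ((PySem.List.enumerate rest (s+1)).foldl _
        (PySem.Set.add seen v, t + ((last - s + 1) + max 0 (last0 - v + 2)))).2 = _
      rw [ih]
      simp only [List.map_cons, List.sum_cons]
      ring
    · rw [if_neg h0, if_neg h0]
      exact ih (s + 1) seen t

theorem ite_nonneg_eq_max (c : Int) : (if c ≥ 0 then c else 0) = max 0 c := by
  split_ifs with h <;> omega

-- per-value cost term shared by both reductions
def costF (last0 : Int) (r : List Int) (j : Int) : Int :=
  (index_of_last_nonzero r - (((PySem.List.index? r j).getD 0 : Nat) : Int) + 1)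
    + max 0 (last0 - j + 2)

theorem foldl_pair_append_ite {α : Type} (p : α → Prop) [DecidablePred p] (f g : α → Int)
    (L : List α) (c : List Int × List Int) :
    (L.foldl (fun C j => if p j then (C.1 ++ [f j], C.2 ++ [g j]) else C) c).1.sum
      + (L.foldl (fun C j => if p j then (C.1 ++ [f j], C.2 ++ [g j]) else C) c).2.sum
      = c.1.sum + c.2.sum + ((L.filter (fun j => decide (p j))).map (fun j => f j + g j)).sum := by
  have h1 : (L.foldl (fun C j => if p j then (C.1 ++ [f j], C.2 ++ [g j]) else C) c)
      = (L.foldl (fun s e => ((if p e then s.1 ++ [f e] else s.1), (if p e then s.2 ++ [g e] else s.2))) c) := by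
    apply PySem.List.foldl_congr_mem
    intro acc x _
    by_cases hp : p x <;> simp [hp]
  rw [h1]
  obtain ⟨c1, c2⟩ := c
  rw [PySem.List.foldl_prod_mk (f := fun s e => if p e then s ++ [f e] else s)
      (g := fun s e => if p e then s ++ [g e] else s)]
  simp only [PySem.List.foldl_append_ite]
  rw [List.sum_append, List.sum_append, PySem.List.sum_map_add_int]
  ring

theorem foldl_pair_sum {α : Type} (FA : (List Int × List Int) → α → (List Int × List Int))
    (FB : Int → α → Int)
    (h : ∀ C r, (FA C r).1.sum + (FA C r).2.sum = FB (C.1.sum + C.2.sum) r) :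
    ∀ (rows : List α) (C : List Int × List Int),
      (rows.foldl FA C).1.sum + (rows.foldl FA C).2.sum = rows.foldl FB (C.1.sum + C.2.sum) := by
  intro rows
  induction rows with
  | nil => intro C; rfl
  | cons r rest ih =>
    intro C
    rw [List.foldl_cons, List.foldl_cons, ih (FA C r), h C r]

-- A's per-row sum: over values j ∈ 1..M present in the row
theorem h_func_as_sum (state : List (List Int)) :
    h_func state
      = (state.map (fun r =>
          (((PySem.List.pyRange 1 (((PySem.List.pyGetD state 0 []).length : Int) + 1) 1).filter
              (fun j => decide (j ∈ r))).map
            (costF (index_of_last_nonzero (PySem.List.pyGetD state 0 [])) r)).sum)).sum := by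
  simp only [h_func]
  rw [PySem.List.foldl_pyRange_zero_pyGetD' state []
      (fun (C : List Int × List Int) row =>
        (PySem.List.pyRange 1 (((PySem.List.pyGetD state 0 []).length : Int) + 1) 1).foldl
          (fun (C : List Int × List Int) j =>
            if j ∈ row then
              (C.1 ++ [(index_of_last_nonzero row
                  - (((PySem.List.index? row j).getD 0 : Nat) : Int)) + 1],
               C.2 ++ [if index_of_last_nonzero (PySem.List.pyGetD state 0 []) - (j - 1) + 1 ≥ 0
                 then index_of_last_nonzero (PySem.List.pyGetD state 0 []) - (j - 1) + 1 else 0])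
            else C) C)
      ([], [])]
  rw [foldl_pair_sum
      (FA := fun (C : List Int × List Int) (r : List Int) =>
        (PySem.List.pyRange 1 (((PySem.List.pyGetD state 0 []).length : Int) + 1) 1).foldl
          (fun (C : List Int × List Int) j =>
            if j ∈ r then
              (C.1 ++ [(index_of_last_nonzero r
                  - (((PySem.List.index? r j).getD 0 : Nat) : Int)) + 1],
               C.2 ++ [if index_of_last_nonzero (PySem.List.pyGetD state 0 []) - (j - 1) + 1 ≥ 0
                 then index_of_last_nonzero (PySem.List.pyGetD state 0 []) - (j - 1) + 1 else 0])
            else C) C)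
      (FB := fun (t : Int) (r : List Int) =>
        t + (((PySem.List.pyRange 1 (((PySem.List.pyGetD state 0 []).length : Int) + 1) 1).filter
            (fun j => decide (j ∈ r))).map
          (costF (index_of_last_nonzero (PySem.List.pyGetD state 0 [])) r)).sum)
      (by
        intro C r
        rw [foldl_pair_append_ite (p := fun j => j ∈ r)
            (f := fun j => (index_of_last_nonzero r
                - (((PySem.List.index? r j).getD 0 : Nat) : Int)) + 1)
            (g := fun j => if index_of_last_nonzero (PySem.List.pyGetD state 0 []) - (j - 1) + 1 ≥ 0
                then index_of_last_nonzero (PySem.List.pyGetD state 0 []) - (j - 1) + 1 else 0)]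
        have hc : ∀ j : Int,
            ((index_of_last_nonzero r - (((PySem.List.index? r j).getD 0 : Nat) : Int)) + 1)
              + (if index_of_last_nonzero (PySem.List.pyGetD state 0 []) - (j - 1) + 1 ≥ 0
                 then index_of_last_nonzero (PySem.List.pyGetD state 0 []) - (j - 1) + 1 else 0)
            = costF (index_of_last_nonzero (PySem.List.pyGetD state 0 [])) r j := by
          intro j
          rw [ite_nonneg_eq_max, costF]
          have h2 : index_of_last_nonzero (PySem.List.pyGetD state 0 []) - (j - 1) + 1
              = index_of_last_nonzero (PySem.List.pyGetD state 0 []) - j + 2 := by ring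
          rw [h2]
        simp only [hc])
      state ([], [])]
  rw [PySem.List.foldl_add]
  norm_num

-- B's per-row sum equals A's: the taken pairs enumerate the same value set
theorem row_sums_eq (M last0 : Int) (r : List Int) :
    ((takeB M r 0 []).map
        (fun pv => (last_nonzero r - pv.1 + 1) + max 0 (last0 - pv.2 + 2))).sum
      = (((PySem.List.pyRange 1 (M + 1) 1).filter (fun j => decide (j ∈ r))).map
          (costF last0 r)).sum := by
  have hmapped : (takeB M r 0 []).map
        (fun pv => (last_nonzero r - pv.1 + 1) + max 0 (last0 - pv.2 + 2))
      = (takeB M r 0 []).map (fun pv => costF last0 r pv.2) := by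
    apply List.map_congr_left
    intro pv hpv
    obtain ⟨_, k, hk, hp⟩ := takeB_mem M r 0 [] pv.1 pv.2 hpv
    rw [costF, last_nonzero_eq, hk, hp]
    norm_num
  rw [hmapped]
  have hperm : List.Perm ((takeB M r 0 []).map (·.2))
      ((PySem.List.pyRange 1 (M + 1) 1).filter (fun j => decide (j ∈ r))) := by
    rw [List.perm_ext_iff_of_nodup (nodup_snd_takeB M r 0 []) ((PySem.List.nodup_pyRange_one 1 (M+1)).filter _)]
    intro v
    rw [mem_snd_takeB, List.mem_filter, PySem.List.mem_pyRange_one]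
    constructor
    · rintro ⟨h1, ⟨h2, h3⟩, _⟩; exact ⟨⟨h2, by omega⟩, by simpa using h1⟩
    · rintro ⟨⟨h2, h3⟩, h1⟩; exact ⟨by simpa using h1, ⟨h2, by omega⟩, by simp⟩
  calc ((takeB M r 0 []).map (fun pv => costF last0 r pv.2)).sum
      = (((takeB M r 0 []).map (·.2)).map (costF last0 r)).sum := by rw [List.map_map]; rfl
    _ = _ := List.Perm.sum_eq (List.Perm.map _ hperm)

-- ===== VERDICT (by name: the statement is the Claim_ definition above) =====
theorem h_func_spec : Claim_equal_h_func := by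
  intro state _
  show h_func state = h_func_alt state
  by_cases hs : state = []
  · subst hs; rfl
  · rw [h_func_as_sum]
    rw [show h_func_alt state
        = state.foldl (fun total row =>
            ((PySem.List.enumerate row 0).foldl
              (fun (st : PySem.Set Int × Int) pv =>
                if 1 ≤ pv.2 ∧ pv.2 ≤ ((PySem.List.pyGetD state 0 []).length : Int) ∧ pv.2 ∉ st.1 then
                  (PySem.Set.add st.1 pv.2,
                   st.2 + ((last_nonzero row - pv.1 + 1)
                     + max 0 (last_nonzero (PySem.List.pyGetD state 0 []) - pv.2 + 2)))
                else st) (PySem.Set.empty, total)).2) 0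
        from by rw [h_func_alt, if_neg hs]]
    rw [PySem.List.foldl_congr_mem state
        (fun total row =>
            ((PySem.List.enumerate row 0).foldl
              (fun (st : PySem.Set Int × Int) pv =>
                if 1 ≤ pv.2 ∧ pv.2 ≤ ((PySem.List.pyGetD state 0 []).length : Int) ∧ pv.2 ∉ st.1 then
                  (PySem.Set.add st.1 pv.2,
                   st.2 + ((last_nonzero row - pv.1 + 1)
                     + max 0 (last_nonzero (PySem.List.pyGetD state 0 []) - pv.2 + 2)))
                else st) (PySem.Set.empty, total)).2)
        (fun total row =>
          total + ((takeB ((PySem.List.pyGetD state 0 []).length : Int) row 0 []).map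
            (fun pv => (last_nonzero row - pv.1 + 1)
              + max 0 (last_nonzero (PySem.List.pyGetD state 0 []) - pv.2 + 2))).sum)
        0
        (fun acc row _ => innerB ((PySem.List.pyGetD state 0 []).length : Int)
          (last_nonzero row) (last_nonzero (PySem.List.pyGetD state 0 [])) row 0 PySem.Set.empty acc)]
    rw [PySem.List.foldl_add, Int.zero_add]
    apply congrArg List.sum
    apply List.map_congr_left
    intro r _
    rw [last_nonzero_eq (PySem.List.pyGetD state 0 [])]
    exact (row_sums_eq ((PySem.List.pyGetD state 0 []).length : Int)
      (index_of_last_nonzero (PySem.List.pyGetD state 0 [])) r).symm
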